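-- pv_equiv track=rewrite | github.com/pypi-data/pypi-mirror-389 | packages/rtsvg/rtsvg-0.1.23.20251105.tar.gz/rtsvg-0.1.23.20251105/rtsvg/rt_text_mixin.py | __validateCitationSubstring__
-- ===== SOURCE A (Python) =====
-- def __validateCitationSubstring__(_substring_):
--     _chrs_    = []
--     _seq_     = []
--     in_number = False
--     i         = 1
--     while i < len(_substring_)-1:
--         if in_number:
--             if _substring_[i] >= '0' and _substring_[i] <= '9':
--                 _chrs_.append(_substring_[i])
--             elif _substring_[i] == ',':
--                 _chrs_.append(',')
--                 _seq_.append('c')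
--                 in_number = False
--             elif _substring_[i] == '-':
--                 _chrs_.append('-')
--                 _seq_.append('d')
--                 in_number = False
--             elif _substring_[i] == ' ' or _substring_[i] == '\t' or _substring_[i] == '\n':
--                 in_number = False
--             else:
--                 return False, None
--         else:
--             if _substring_[i] >= '0' and _substring_[i] <= '9':
--                 _chrs_.append(_substring_[i])
--                 _seq_.append('n')
--                 in_number = True
--             elif _substring_[i] == ',':
--                 _chrs_.append(',')
--                 _seq_.append('c')
--             elif _substring_[i] == '-':
--                 _chrs_.append('-')
--                 _seq_.append('d')
--             elif _substring_[i] == ' ' or _substring_[i] == '\t' or _substring_[i] == '\n':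
--                 ...
--             else:
--                 return False, None
--         i += 1
--
--     # Make the sequence string
--     _sequence_ = ''.join(_seq_)
--     if len(_sequence_) == 0:                          return False, None # cannot be empty
--     if _sequence_[0] != 'n' or _sequence_[-1] != 'n': return False, None # must start and end with a number
--     _accept_ = ['nc','nd','cn','dn']
--     for i in range(len(_sequence_)-1):
--         if _sequence_[i:i+2] not in _accept_: return False,None
--     return True, ''.join(_chrs_)
-- ===== SOURCE B (Python) =====
-- def __validateCitationSubstring__(_substring_):
--     interior = _substring_[1:-1]
--     # tokenize: maximal digit runs and single ',' / '-' separators; skip whitespace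
--     tokens = []
--     i, n = 0, len(interior)
--     while i < n:
--         c = interior[i]
--         if c == ' ' or c == '\t' or c == '\n':
--             i += 1
--         elif '0' <= c <= '9':
--             j = i
--             while j < n and '0' <= interior[j] <= '9':
--                 j += 1
--             tokens.append(interior[i:j])
--             i = j
--         elif c == ',' or c == '-':
--             tokens.append(c)
--             i += 1
--         else:
--             return False, None
--     # valid iff tokens strictly alternate number / separator, starting and ending with a number
--     expect_num = True
--     for t in tokens:
--         if expect_num != ('0' <= t[0] <= '9'):
--             return False, None
--         expect_num = not expect_num
--     if expect_num:
--         return False, None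
--     return True, ''.join(tokens)
-- ===== Notes on version B (the rewrite author's own statement) =====
-- stated objective: alternative
-- what changed: Replaces A's per-character in_number flag machine with parallel _chrs_/_seq_ lists and a windowed adjacent-pair validation against an accept table by a tokenizer (maximal digit runs, single separators) followed by a single parity-alternation pass over the tokens and a join.
import Mathlib
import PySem

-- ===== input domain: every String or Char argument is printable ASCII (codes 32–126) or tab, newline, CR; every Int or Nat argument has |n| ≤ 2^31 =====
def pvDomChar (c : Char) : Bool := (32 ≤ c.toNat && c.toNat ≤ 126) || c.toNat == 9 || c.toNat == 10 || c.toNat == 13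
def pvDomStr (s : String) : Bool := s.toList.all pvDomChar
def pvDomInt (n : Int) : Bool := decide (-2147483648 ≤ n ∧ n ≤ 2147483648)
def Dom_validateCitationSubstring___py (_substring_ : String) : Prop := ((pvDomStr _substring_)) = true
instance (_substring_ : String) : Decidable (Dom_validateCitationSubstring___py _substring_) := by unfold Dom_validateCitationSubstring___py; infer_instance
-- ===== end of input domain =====

-- B replaces A's per-character in_number flag machine + seq/accept-pair validation by a
-- tokenizer (digit runs / separators) plus one parity-alternation pass; same O(n) cost.

-- ===== PORT A =====
-- shared char tests: '0' <= c <= '9'  and  c in ' \t\n'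
def pvIsDig (c : Char) : Bool := '0' ≤ c && c ≤ '9'
def pvIsWs (c : Char) : Bool := c = ' ' || c = '\t' || c = '\n'

-- the while loop over i = 1 .. len-2: state (_chrs_, _seq_, in_number); None = early 'return False, None'
def pvLoopA : List Char → List Char → List Char → Bool → Option (List Char × List Char)
  | [], chrs, seq, _ => some (chrs, seq)
  | c :: rest, chrs, seq, inNum =>
    if inNum then
      if pvIsDig c then pvLoopA rest (chrs ++ [c]) seq true
      else if c = ',' then pvLoopA rest (chrs ++ [',']) (seq ++ ['c']) false
      else if c = '-' then pvLoopA rest (chrs ++ ['-']) (seq ++ ['d']) false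
      else if pvIsWs c then pvLoopA rest chrs seq false
      else none
    else
      if pvIsDig c then pvLoopA rest (chrs ++ [c]) (seq ++ ['n']) true
      else if c = ',' then pvLoopA rest (chrs ++ [',']) (seq ++ ['c']) false
      else if c = '-' then pvLoopA rest (chrs ++ ['-']) (seq ++ ['d']) false
      else if pvIsWs c then pvLoopA rest chrs seq false
      else none

-- 'for i in range(len(_sequence_)-1): if _sequence_[i:i+2] not in _accept_: return False'
-- as the structural recursion over the adjacent windows _sequence_[i:i+2]
def pvPairCheck : List Char → Bool
  | a :: b :: rest => ([a, b] ∈ [['n','c'], ['n','d'], ['c','n'], ['d','n']]) && pvPairCheck (b :: rest)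
  | _ => true

def validateCitationSubstring___py (_substring_ : String) : Bool × Option String :=
  -- the loop reads _substring_[i] for i = 1 .. len-2, in order
  match pvLoopA ((_substring_.toList.drop 1).dropLast) [] [] false with
  | none => (false, none)
  | some (chrs, seq) =>
    if seq = [] then (false, none)
    else if ¬ (seq.headD ' ' = 'n') ∨ ¬ (seq.getLastD ' ' = 'n') then (false, none)
    else if pvPairCheck seq then (true, some (String.mk chrs))
    else (false, none)

-- ===== PORT B =====
-- tokenizer while-loop of Source B: whitespace skipped, maximal digit run (inner while = takeWhile/dropWhile), single separators
def pvTokB (cs : List Char) (toks : List (List Char)) : Option (List (List Char)) :=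
  match cs with
  | [] => some toks
  | c :: rest =>
    if pvIsWs c then pvTokB rest toks
    else if pvIsDig c then
      pvTokB ((c :: rest).dropWhile pvIsDig) (toks ++ [(c :: rest).takeWhile pvIsDig])
    else if c = ',' || c = '-' then pvTokB rest (toks ++ [[c]])
    else none
termination_by cs.length
decreasing_by
  · simp
  · simp only [List.dropWhile_cons, *, if_pos, List.length_cons]
    exact Nat.lt_succ_of_le (List.length_dropWhile_le _ _)
  · simp

-- 'for t in tokens: …; expect_num = not expect_num' then 'if expect_num: return False'
def pvAltB : List (List Char) → Bool → Bool
  | [], expect => !expect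
  | t :: ts, expect => if expect == pvIsDig (t.headD ' ') then pvAltB ts (!expect) else false

def validateCitationSubstring___py_alt (_substring_ : String) : Bool × Option String :=
  -- interior = _substring_[1:-1]
  match pvTokB (PySem.List.slice _substring_.toList (some 1) (some (-1))) [] with
  | none => (false, none)
  | some toks =>
    if pvAltB toks true then (true, some (String.mk toks.flatten))
    else (false, none)

-- ===== PRECONDITION & SPEC =====
def Spec_validateCitationSubstring___py (_substring_ : String) (out : Bool × Option String) : Prop := out = validateCitationSubstring___py_alt _substring_
instance (_substring_ : String) (out : Bool × Option String) : Decidable (Spec_validateCitationSubstring___py _substring_ out) := by unfold Spec_validateCitationSubstring___py; infer_instance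

-- ===== CLAIM (what is proved, stated in full; the proofs are below) =====
def Claim_equal_validateCitationSubstring___py : Prop := ∀ (_substring_ : String), Dom_validateCitationSubstring___py _substring_ → Spec_validateCitationSubstring___py _substring_ (validateCitationSubstring___py _substring_)

-- ===== LEMMAS AND PROOFS =====

-- class of a token, as the char A appends to _seq_ for it
def pvCls (t : List Char) : Char :=
  if pvIsDig (t.headD ' ') then 'n' else if t = [','] then 'c' else 'd'

-- while in_number, A consumes exactly the maximal digit run, appending it to _chrs_
theorem pvLoopA_run (cs chrs seq : List Char) :
    pvLoopA cs chrs seq true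
      = pvLoopA (cs.dropWhile pvIsDig) (chrs ++ cs.takeWhile pvIsDig) seq false := by
  induction cs generalizing chrs with
  | nil => simp [pvLoopA]
  | cons c rest ih =>
    by_cases hd : pvIsDig c
    · simp [pvLoopA, hd, ih, List.dropWhile_cons, List.takeWhile_cons]
    · simp only [List.dropWhile_cons, List.takeWhile_cons, hd, if_neg, Bool.false_eq_true,
        not_false_eq_true, List.append_nil]
      simp [pvLoopA, hd]

-- simulation: A's loop from a state describing B's tokens-so-far tracks B's tokenizer
theorem pvSim (n : ℕ) : ∀ cs : List Char, cs.length ≤ n → ∀ toks : List (List Char),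
    pvLoopA cs toks.flatten (toks.map pvCls) false
      = (pvTokB cs toks).map (fun ts => (ts.flatten, ts.map pvCls)) := by
  induction n with
  | zero =>
    intro cs hcs toks
    have : cs = [] := List.length_eq_zero_iff.mp (Nat.le_zero.mp hcs)
    subst this
    simp [pvLoopA, pvTokB]
  | succ n ih =>
    intro cs hcs toks
    match cs with
    | [] => simp [pvLoopA, pvTokB]
    | c :: rest =>
      have hr : rest.length ≤ n := by simpa using hcs
      by_cases hw : pvIsWs c
      · have h3 : c = ' ' ∨ c = '\t' ∨ c = '\n' := by
          have := hw; simp [pvIsWs] at this; tauto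
        have hd : pvIsDig c = false := by rcases h3 with rfl | rfl | rfl <;> decide
        have hc : c ≠ ',' := by rcases h3 with rfl | rfl | rfl <;> decide
        have hm : c ≠ '-' := by rcases h3 with rfl | rfl | rfl <;> decide
        rw [pvTokB]
        simp [pvLoopA, hw, hd, hc, hm, ih rest hr]
      · by_cases hd : pvIsDig c
        · -- digit: A enters in_number and consumes the run; B emits the run token
          have hrun : pvCls (c :: rest.takeWhile pvIsDig) = 'n' := by
            simp [pvCls, hd]
          have hlen : ((c :: rest).dropWhile pvIsDig).length ≤ n := by
            simp only [List.dropWhile_cons, hd, if_pos]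
            exact le_trans (List.length_dropWhile_le _ _) hr
          have hih := ih ((c :: rest).dropWhile pvIsDig) hlen
                    (toks ++ [(c :: rest).takeWhile pvIsDig])
          rw [pvTokB]
          simp only [pvLoopA, hw, hd, if_pos, Bool.false_eq_true, if_neg, not_false_eq_true,
            if_true]
          rw [pvLoopA_run]
          simpa [List.takeWhile_cons, hd, hrun, List.flatten_append] using hih
        · by_cases hc : c = ','
          · subst hc
            have hih := ih rest hr (toks ++ [[',']])
            have hcl : pvCls [','] = 'c' := by decide
            rw [pvTokB]
            simp only [pvLoopA, hw, hd, if_neg, Bool.false_eq_true, not_false_eq_true]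
            simpa [hcl, List.flatten_append] using hih
          · by_cases hm : c = '-'
            · subst hm
              have hih := ih rest hr (toks ++ [['-']])
              have hcl : pvCls ['-'] = 'd' := by decide
              rw [pvTokB]
              simp only [pvLoopA, hw, hd, if_neg, Bool.false_eq_true, not_false_eq_true]
              simpa [hcl, List.flatten_append] using hih
            · rw [pvTokB]
              simp [pvLoopA, hw, hd, hc, hm]

-- the interior _substring_[1:-1] is exactly the chars the index loop reads
theorem pvInterior_eq (xs : List Char) :
    PySem.List.slice xs (some 1) (some (-1)) = (xs.drop 1).dropLast := by
  unfold PySem.List.slice PySem.List.clampIdx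
  norm_num
  rcases xs with _ | ⟨a, l⟩
  · simp
  · simp [List.dropLast_eq_take]

-- the char-level alternation automaton (= pvAltB through pvCls)
def pvAltC : List Char → Bool → Bool
  | [], expect => !expect
  | c :: s, expect => if expect == (c == 'n') then pvAltC s (!expect) else false

theorem pvAltB_eq_altC (ts : List (List Char)) (e : Bool) :
    pvAltB ts e = pvAltC (ts.map pvCls) e := by
  induction ts generalizing e with
  | nil => simp [pvAltB, pvAltC]
  | cons t ts ih =>
    have hsp : pvIsDig ' ' = false := by decide
    cases t with
    | nil => simp [pvAltB, pvAltC, pvCls, hsp, ih]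
    | cons a t' =>
      by_cases hpd : pvIsDig a
      · simp [pvAltB, pvAltC, pvCls, hpd, ih]
      · have hne : (pvCls (a :: t') == 'n') = false := by
          simp only [pvCls, List.headD_cons, hpd, Bool.false_eq_true, if_false]
          split <;> decide
        simp [pvAltB, pvAltC, hpd, hne, ih]

-- the token classes are only 'n', 'c', 'd'
theorem pvCls_mem (t : List Char) : pvCls t = 'n' ∨ pvCls t = 'c' ∨ pvCls t = 'd' := by
  unfold pvCls; split
  · exact Or.inl rfl
  · split
    · exact Or.inr (Or.inl rfl)
    · exact Or.inr (Or.inr rfl)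

-- A's three checks on _sequence_ = the alternation automaton, for n/c/d sequences
theorem pvAcond_eq (seq : List Char) (hok : ∀ x ∈ seq, x = 'n' ∨ x = 'c' ∨ x = 'd') :
    (pvAltC seq true = ((seq ≠ []) && (seq.headD ' ' == 'n') && (seq.getLastD ' ' == 'n') && pvPairCheck seq))
    ∧ (pvAltC seq false = ((seq = []) || ((¬ seq.headD ' ' = 'n') && (seq.getLastD ' ' == 'n') && pvPairCheck seq))) := by
  induction seq with
  | nil => simp [pvAltC]
  | cons c s ih =>
    have hc := hok c (by simp)
    have hs : ∀ x ∈ s, x = 'n' ∨ x = 'c' ∨ x = 'd' := fun x hx => hok x (by simp [hx])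
    obtain ⟨ihT, ihF⟩ := ih hs
    rcases s with _ | ⟨d, s'⟩
    · rcases hc with rfl | rfl | rfl <;> simp [pvAltC, pvPairCheck]
    · have hd := hs d (by simp)
      constructor
      · rcases hc with rfl | rfl | rfl
        · rcases hd with rfl | rfl | rfl <;>
            simp_all [pvAltC, pvPairCheck]
        · simp [pvAltC]
        · simp [pvAltC]
      · rcases hc with rfl | rfl | rfl
        · simp [pvAltC]
        · rcases hd with rfl | rfl | rfl <;>
            simp_all [pvAltC, pvPairCheck]
        · rcases hd with rfl | rfl | rfl <;>
            simp_all [pvAltC, pvPairCheck]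

-- ===== VERDICT (by name: the statement is the Claim_ definition above) =====
theorem validateCitationSubstring___py_spec : Claim_equal_validateCitationSubstring___py := by
  intro s _
  unfold Spec_validateCitationSubstring___py validateCitationSubstring___py validateCitationSubstring___py_alt
  rw [pvInterior_eq]
  generalize (s.toList.drop 1).dropLast = cs
  have hsim := pvSim cs.length cs (le_refl _) []
  simp only [List.flatten_nil, List.map_nil] at hsim
  rw [hsim]
  cases htok : pvTokB cs [] with
  | none => simp
  | some toks =>
    simp only [Option.map_some]
    have hok : ∀ x ∈ toks.map pvCls, x = 'n' ∨ x = 'c' ∨ x = 'd' := by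
      intro x hx
      obtain ⟨t, _, rfl⟩ := List.mem_map.mp hx
      exact pvCls_mem t
    obtain ⟨hT, _⟩ := pvAcond_eq (toks.map pvCls) hok
    rw [pvAltB_eq_altC, hT]
    simp only [List.headD_eq_head?_getD, List.getLastD_eq_getLast?, List.head?_map,
      List.getLast?_map] at hT ⊢
    by_cases h1 : toks.map pvCls = []
    · simp [h1]
    · by_cases h2 : (Option.map pvCls toks.head?).getD ' ' = 'n'
      · by_cases h3 : (Option.map pvCls toks.getLast?).getD ' ' = 'n'
        · by_cases h4 : pvPairCheck (toks.map pvCls) = true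
          · simp [h1, h2, h3, h4]
          · simp [h1, h2, h3, h4]
        · simp [h1, h2, h3]
      · simp [h1, h2]
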